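-- pv_equiv track=rewrite | github.com/genken1/testing-checkers | checkers.py | pixel_to_int
-- ===== SOURCE A (Python) =====
-- def pixel_to_int(x, y):
--     retx = 0
--     retx_tot = 70
--
--     rety = 0
--     rety_tot = 70
--
--     while (x > retx_tot and retx < 7):
--         retx = retx + 1
--         retx_tot = retx_tot + 70
--
--     while (y > rety_tot and rety < 7):
--         rety = rety + 1
--         rety_tot = rety_tot + 70
--
--     return (retx, rety)
-- ===== SOURCE B (Python) =====
-- def pixel_to_int(x, y):
--     # Closed-form clamped cell index instead of the two while loops.
--     return (min(7, max(0, (x - 1) // 70)), min(7, max(0, (y - 1) // 70)))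
-- ===== Notes on version B (the rewrite author's own statement) =====
-- stated objective: simpler
-- what changed: Replaces both bounded while-loop searches with a closed-form integer expression min(7, max(0, (v-1)//70)) per coordinate.
import Mathlib
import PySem

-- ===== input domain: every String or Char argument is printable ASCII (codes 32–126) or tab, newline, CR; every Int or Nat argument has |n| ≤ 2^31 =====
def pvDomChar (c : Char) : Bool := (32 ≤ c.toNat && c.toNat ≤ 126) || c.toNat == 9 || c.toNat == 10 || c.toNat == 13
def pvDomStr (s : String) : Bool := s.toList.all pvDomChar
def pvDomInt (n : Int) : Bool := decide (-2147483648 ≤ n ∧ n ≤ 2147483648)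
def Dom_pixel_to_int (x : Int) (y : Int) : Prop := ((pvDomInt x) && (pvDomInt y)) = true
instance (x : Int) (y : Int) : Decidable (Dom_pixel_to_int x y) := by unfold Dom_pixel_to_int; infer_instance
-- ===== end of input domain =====

-- B replaces A's two bounded while loops by a closed-form clamped division per coordinate (objective: simpler).

-- ===== PORT A =====
-- while (v > tot and r < 7): r += 1; tot += 70   — fuel 7 - r encodes the 'r < 7' bound
def pixLoop (v : Int) : Nat → Int → Int → Int
  | 0, r, _ => r
  | Nat.succ f, r, tot => if v > tot then pixLoop v f (r + 1) (tot + 70) else r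

def pixel_to_int (x : Int) (y : Int) : Int × Int :=
  (pixLoop x 7 0 70, pixLoop y 7 0 70)

-- ===== PORT B =====
def pixel_to_int_alt (x : Int) (y : Int) : Int × Int :=
  (min 7 (max 0 (PySem.Int.floordiv (x - 1) 70)),
   min 7 (max 0 (PySem.Int.floordiv (y - 1) 70)))

-- ===== PRECONDITION & SPEC =====
def Spec_pixel_to_int (x : Int) (y : Int) (out : Int × Int) : Prop := out = pixel_to_int_alt x y
instance (x : Int) (y : Int) (out : Int × Int) : Decidable (Spec_pixel_to_int x y out) := by unfold Spec_pixel_to_int; infer_instance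

-- ===== CLAIM (what is proved, stated in full; the proofs are below) =====
def Claim_equal_pixel_to_int : Prop := ∀ (x : Int) (y : Int), Dom_pixel_to_int x y → Spec_pixel_to_int x y (pixel_to_int x y)

-- ===== LEMMAS AND PROOFS =====
theorem pixLoop_closed (v : Int) : ∀ (f : Nat) (r : Int),
    pixLoop v f r (70 * (r + 1)) = min (r + f) (max r (PySem.Int.floordiv (v - 1) 70)) := by
  intro f
  induction f with
  | zero =>
    intro r
    have h : PySem.Int.floordiv (v - 1) 70 = (v - 1) / 70 :=
      PySem.Int.floordiv_eq_ediv_of_pos (by norm_num)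
    simp only [pixLoop, h]
    omega
  | succ f ih =>
    intro r
    have h : PySem.Int.floordiv (v - 1) 70 = (v - 1) / 70 :=
      PySem.Int.floordiv_eq_ediv_of_pos (by norm_num)
    simp only [pixLoop, h]
    by_cases hv : v > 70 * (r + 1)
    · have hrec := ih (r + 1)
      have htot : 70 * (r + 1) + 70 = 70 * (r + 1 + 1) := by ring
      rw [if_pos hv, htot, hrec, h]
      omega
    · rw [if_neg hv]
      omega

theorem pixLoop_top (v : Int) :
    pixLoop v 7 0 70 = min 7 (max 0 (PySem.Int.floordiv (v - 1) 70)) := by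
  have := pixLoop_closed v 7 0
  norm_num at this
  simpa using this

-- ===== VERDICT (by name: the statement is the Claim_ definition above) =====
theorem pixel_to_int_spec : Claim_equal_pixel_to_int := by
  intro x y _
  unfold Spec_pixel_to_int pixel_to_int pixel_to_int_alt
  rw [pixLoop_top, pixLoop_top]
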